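-- pv_equiv track=rewrite | github.com/Ecrintrn/IFLBootCamp2024 | Etkinlik 5/C_1.py | ucgensel_dizi_mi
-- ===== SOURCE A (Python) =====
-- def ucgensel_dizi_mi(liste, kucuk=True):
--     for i in liste:
--         ture = False
--         for x in range(0, i+1):
--             if x**2 + x == 2 * i:
--                 ture = True
--                 break
--         if ture != True:
--             return False
--     ucgensel = ucgensel_sirali_mi(liste, kucuk)
--     if ucgensel:
--         return True
--     return False
--
-- def ucgensel_sirali_mi(liste, kucuk=True):
--     num = liste[0]
--     for i in liste[1:]:
--         if i != ucgensel_mi(num, i, kucuk):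
--             return False
--         num = i
--     return True
--
-- def ucgensel_mi(num, i, kucuk=True):
--     ucgen = 0
--     for x in range(0, i + 1):
--             if x**2 + x == 2 * i:
--                 ucgen = x
--     num += ucgen
--     return num
-- ===== SOURCE B (Python) =====
-- def _isqrt(n):
--     # integer square root of n >= 0 by binary search: returns floor(sqrt(n))
--     lo, hi = 0, n + 1
--     while hi - lo > 1:
--         mid = (lo + hi) // 2
--         if mid * mid <= n:
--             lo = mid
--         else:
--             hi = mid
--     return lo
--
-- def _tri_index(i):
--     # index k with k*(k+1)//2 == i, or None if i is not triangular
--     if i < 0: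
--         return None
--     m = 8 * i + 1
--     s = _isqrt(m)
--     if s * s != m:
--         return None
--     return (s - 1) // 2
--
-- def ucgensel_dizi_mi(liste, kucuk=True):
--     prev = None
--     for i in liste:
--         k = _tri_index(i)
--         if k is None:
--             return False
--         if prev is not None and i != prev + k:
--             return False
--         prev = i
--     return True
-- ===== Notes on version B (the rewrite author's own statement) =====
-- stated objective: faster
-- what changed: replace the per-element linear scan over range(0, i+1) (used twice: once to test triangularity, once to recover the index) with a single pass that computes the triangular index directly via a binary-search integer square root (i triangular iff 8i+1 is a perfect square, index (sqrt-1)//2), merging the two phases of A into one loop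
-- crash fix: On the empty list A raises IndexError (liste[0] in ucgensel_sirali_mi) while B returns True. — e.g. on ucgensel_dizi_mi([], true): A raises IndexError, B returns true
import Mathlib
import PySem

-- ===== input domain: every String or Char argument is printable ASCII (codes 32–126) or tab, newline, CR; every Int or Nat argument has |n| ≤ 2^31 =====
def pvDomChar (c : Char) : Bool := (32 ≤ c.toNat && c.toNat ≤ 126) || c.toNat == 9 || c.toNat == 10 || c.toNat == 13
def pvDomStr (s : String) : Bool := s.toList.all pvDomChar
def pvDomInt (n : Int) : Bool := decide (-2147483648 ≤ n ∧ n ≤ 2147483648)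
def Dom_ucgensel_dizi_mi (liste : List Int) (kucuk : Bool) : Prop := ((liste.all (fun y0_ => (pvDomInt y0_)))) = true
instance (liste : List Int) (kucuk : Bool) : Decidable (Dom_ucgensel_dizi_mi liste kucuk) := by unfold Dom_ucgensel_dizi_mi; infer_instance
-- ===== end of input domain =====

-- B replaces A's per-element linear scan over range(0, i+1) by a binary-search integer
-- square root (i triangular iff 8i+1 is a perfect square) and merges A's two phases into
-- one pass; proved equivalent on non-empty lists (on [] A raises IndexError, B returns true).

-- ===== PORT A =====
-- helper ucgensel_mi: linear scan remembering the LAST x in range(0, i+1) with x**2+x == 2*i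
def ucgensel_mi (num : Int) (i : Int) (kucuk : Bool) : Int :=
  num + (PySem.List.pyRange 0 (i + 1) 1).foldl
          (fun ucgen x => if x * x + x == 2 * i then x else ucgen) 0

-- the loop of ucgensel_sirali_mi (early return → recursion)
def sirali_go (num : Int) (kucuk : Bool) : List Int → Bool
  | [] => true
  | i :: rest => if i ≠ ucgensel_mi num i kucuk then false else sirali_go i kucuk rest

def ucgensel_sirali_mi (liste : List Int) (kucuk : Bool) : Bool :=
  match liste with
  | [] => false            -- Python raises IndexError on liste[0]; excluded by Pre_
  | num :: rest => sirali_go num kucuk rest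

-- the first loop of A (flag 'ture' with break → List.any over the same range)
def dizi_go (liste : List Int) (kucuk : Bool) : List Int → Bool
  | [] =>
      let ucgensel := ucgensel_sirali_mi liste kucuk
      if ucgensel then true else false
  | i :: rest =>
      let ture := (PySem.List.pyRange 0 (i + 1) 1).any (fun x => x * x + x == 2 * i)
      if ture ≠ true then false else dizi_go liste kucuk rest

def ucgensel_dizi_mi (liste : List Int) (kucuk : Bool) : Bool :=
  dizi_go liste kucuk liste

-- ===== PORT B =====
-- binary-search integer square root loop (fuel = initial hi - lo, structural recursion)
def bIsqrtGo (n : Int) : Nat → Int → Int → Int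
  | 0, lo, _ => lo
  | fuel + 1, lo, hi =>
      if hi - lo > 1 then
        let mid := PySem.Int.floordiv (lo + hi) 2
        if mid * mid ≤ n then bIsqrtGo n fuel mid hi else bIsqrtGo n fuel lo mid
      else lo

def bIsqrt (n : Int) : Int := bIsqrtGo n (n + 1).toNat 0 (n + 1)

def bTriIndex (i : Int) : Option Int :=
  if i < 0 then none
  else
    let m := 8 * i + 1
    let s := bIsqrt m
    if s * s ≠ m then none
    else some (PySem.Int.floordiv (s - 1) 2)

def altGo (prev : Option Int) : List Int → Bool
  | [] => true
  | i :: rest =>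
      match bTriIndex i with
      | none => false
      | some k =>
          match prev with
          | some p => if i ≠ p + k then false else altGo (some i) rest
          | none => altGo (some i) rest

def ucgensel_dizi_mi_alt (liste : List Int) (kucuk : Bool) : Bool :=
  altGo none liste

-- ===== PRECONDITION & SPEC =====
-- Pre_ excludes exactly the empty list, where A raises IndexError (liste[0]).
def Pre_ucgensel_dizi_mi (liste : List Int) (kucuk : Bool) : Prop := liste ≠ []
instance (liste : List Int) (kucuk : Bool) : Decidable (Pre_ucgensel_dizi_mi liste kucuk) := by
  unfold Pre_ucgensel_dizi_mi; infer_instance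
def pvWitness_ucgensel_dizi_mi : List Int × Bool := ([1, 3, 6], true)

-- On the empty list A raises IndexError (liste[0] in ucgensel_sirali_mi) while B returns True.
def Raises_ucgensel_dizi_mi (liste : List Int) (kucuk : Bool) : Prop := liste = []
instance (liste : List Int) (kucuk : Bool) : Decidable (Raises_ucgensel_dizi_mi liste kucuk) := by
  unfold Raises_ucgensel_dizi_mi; infer_instance
def pvRaiseWitness_ucgensel_dizi_mi : List Int × Bool := ([], true)
def pvRaiseWitnessOut_ucgensel_dizi_mi : Bool := true

def Spec_ucgensel_dizi_mi (liste : List Int) (kucuk : Bool) (out : Bool) : Prop := out = ucgensel_dizi_mi_alt liste kucuk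
instance (liste : List Int) (kucuk : Bool) (out : Bool) : Decidable (Spec_ucgensel_dizi_mi liste kucuk out) := by unfold Spec_ucgensel_dizi_mi; infer_instance

-- ===== CLAIM (what is proved, stated in full; the proofs are below) =====
def Claim_equal_ucgensel_dizi_mi : Prop := ∀ (liste : List Int) (kucuk : Bool), Dom_ucgensel_dizi_mi liste kucuk → Pre_ucgensel_dizi_mi liste kucuk → Spec_ucgensel_dizi_mi liste kucuk (ucgensel_dizi_mi liste kucuk)
def Claim_raises_ucgensel_dizi_mi : Prop := (∀ (liste : List Int) (kucuk : Bool), Dom_ucgensel_dizi_mi liste kucuk → Raises_ucgensel_dizi_mi liste kucuk → ¬ Pre_ucgensel_dizi_mi liste kucuk) ∧ (Dom_ucgensel_dizi_mi (pvRaiseWitness_ucgensel_dizi_mi.1) (pvRaiseWitness_ucgensel_dizi_mi.2) ∧ Raises_ucgensel_dizi_mi (pvRaiseWitness_ucgensel_dizi_mi.1) (pvRaiseWitness_ucgensel_dizi_mi.2) ∧ ucgensel_dizi_mi_alt (pvRaiseWitness_ucgensel_dizi_mi.1) (pvRaiseWitness_ucgensel_dizi_mi.2) = pvRaiseWitnes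sOut_ucgensel_dizi_mi)

-- ===== LEMMAS AND PROOFS =====

-- isqrt loop correctness
theorem bIsqrtGo_spec (n : Int) (fuel : Nat) (lo hi : Int)
    (hfuel : (hi - lo).toNat ≤ fuel) (h0 : 0 ≤ lo) (hlt : lo < hi)
    (h1 : lo * lo ≤ n) (h2 : n < hi * hi) :
    0 ≤ bIsqrtGo n fuel lo hi ∧ bIsqrtGo n fuel lo hi * bIsqrtGo n fuel lo hi ≤ n ∧
      n < (bIsqrtGo n fuel lo hi + 1) * (bIsqrtGo n fuel lo hi + 1) := by
  induction fuel generalizing lo hi with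
  | zero => omega
  | succ fuel ih =>
    simp only [bIsqrtGo]
    by_cases hbig : hi - lo > 1
    · simp only [if_pos hbig]
      have hmid1 : lo + 1 ≤ PySem.Int.floordiv (lo + hi) 2 := by
        rw [PySem.Int.le_floordiv_iff_mul_le (by omega)]; omega
      have hmid2 : PySem.Int.floordiv (lo + hi) 2 < hi := by
        rw [PySem.Int.floordiv_lt_iff_lt_mul (by omega)]; omega
      set mid := PySem.Int.floordiv (lo + hi) 2 with hm
      by_cases hc : mid * mid ≤ n
      · simp only [if_pos hc]
        exact ih mid hi (by omega) (by omega) (by omega) hc h2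
      · simp only [if_neg hc]
        exact ih lo mid (by omega) h0 (by omega) h1 (by omega)
    · simp only [if_neg hbig]
      have : hi = lo + 1 := by omega
      subst this
      exact ⟨h0, h1, h2⟩

theorem bIsqrt_spec (n : Int) (hn : 0 ≤ n) :
    0 ≤ bIsqrt n ∧ bIsqrt n * bIsqrt n ≤ n ∧ n < (bIsqrt n + 1) * (bIsqrt n + 1) := by
  apply bIsqrtGo_spec n (n + 1).toNat 0 (n + 1) (by omega) le_rfl (by omega) (by nlinarith)
  nlinarith

-- the square root of a perfect square
theorem bIsqrt_of_sq (t : Int) (ht : 0 ≤ t) : bIsqrt (t * t) = t := by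
  obtain ⟨h0, h1, h2⟩ := bIsqrt_spec (t * t) (by positivity)
  nlinarith

-- uniqueness of the nonnegative solution of x*x + x = 2*i
theorem tri_unique (x y i : Int) (hx : 0 ≤ x) (hy : 0 ≤ y)
    (h1 : x * x + x = 2 * i) (h2 : y * y + y = 2 * i) : x = y := by
  rcases lt_trichotomy x y with h | h | h
  · nlinarith
  · exact h
  · nlinarith

-- bTriIndex finds exactly the nonnegative solution
theorem bTriIndex_some (i k : Int) (hk : 0 ≤ k) (heq : k * k + k = 2 * i) :
    bTriIndex i = some k := by
  have hi : 0 ≤ i := by nlinarith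
  have hm : 8 * i + 1 = (2 * k + 1) * (2 * k + 1) := by linear_combination (-4) * heq
  have hs : bIsqrt (8 * i + 1) = 2 * k + 1 := by
    rw [hm]; exact bIsqrt_of_sq _ (by omega)
  simp only [bTriIndex, if_neg (by omega : ¬ i < 0), hs]
  rw [if_neg (by omega)]
  have : (2 * k + 1 - 1 : Int) = 2 * k := by ring
  rw [this, PySem.Int.floordiv_eq_ediv_of_pos (by omega)]
  congr 1
  omega

theorem bTriIndex_inv (i k : Int) (h : bTriIndex i = some k) :
    0 ≤ k ∧ k * k + k = 2 * i := by
  by_cases hi : i < 0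
  · simp [bTriIndex, hi] at h
  · have hm : (0 : Int) ≤ 8 * i + 1 := by omega
    obtain ⟨h0, h1, h2⟩ := bIsqrt_spec (8 * i + 1) hm
    simp only [bTriIndex, if_neg hi] at h
    by_cases hsq : bIsqrt (8 * i + 1) * bIsqrt (8 * i + 1) ≠ 8 * i + 1
    · simp [hsq] at h
    · push_neg at hsq
      rw [if_neg (by omega)] at h
      set s := bIsqrt (8 * i + 1) with hsdef
      -- s is odd: s*s = 8i+1
      rcases Int.even_or_odd s with ⟨t, hts⟩ | ⟨t, hts⟩
      · exfalso
        have : (t + t) * (t + t) = 4 * (t * t) := by ring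
        rw [hts, this] at hsq; omega
      · have h4 : (2 * t + 1) * (2 * t + 1) = 4 * (t * t) + 4 * t + 1 := by ring
        rw [hts, h4] at hsq
        have ht0 : 0 ≤ t := by omega
        have hkt : k = t := by
          have : s - 1 = 2 * t := by omega
          rw [this, PySem.Int.floordiv_eq_ediv_of_pos (by omega)] at h
          have : (2 * t) / 2 = t := by omega
          rw [this] at h
          exact (Option.some_inj.mp h).symm
        constructor
        · omega
        · rw [hkt]; omega

-- A's inner 'any' over range(0, i+1) detects exactly the inputs where bTriIndex is some
theorem any_iff_triIndex (i : Int) :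
    ((PySem.List.pyRange 0 (i + 1) 1).any (fun x => x * x + x == 2 * i)) = (bTriIndex i).isSome := by
  by_cases h : ∃ k, 0 ≤ k ∧ k * k + k = 2 * i
  · obtain ⟨k, hk, heq⟩ := h
    rw [bTriIndex_some i k hk heq]
    simp only [Option.isSome_some]
    rw [List.any_eq_true]
    refine ⟨k, ?_, by simpa using heq⟩
    rw [PySem.List.mem_pyRange_one]
    constructor
    · exact hk
    · rcases eq_or_lt_of_le hk with h0 | h0
      · nlinarith
      · nlinarith
  · push_neg at h
    have hnone : bTriIndex i = none := by
      cases htri : bTriIndex i with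
      | none => rfl
      | some k =>
        obtain ⟨hk, heq⟩ := bTriIndex_inv i k htri
        exact absurd heq (h k hk)
    rw [hnone]
    simp only [Option.isSome_none]
    rw [Bool.eq_false_iff]
    intro hany
    rw [List.any_eq_true] at hany
    obtain ⟨x, hmem, heq⟩ := hany
    rw [PySem.List.mem_pyRange_one] at hmem
    simp only [beq_iff_eq] at heq
    exact h x hmem.1 heq

-- the last-match fold returns the unique satisfying element
theorem foldl_last_sat (P : Int → Bool) (k : Int) (hk : P k = true) :
    ∀ (l : List Int) (u : Int), (k ∈ l ∨ u = k) → (∀ x ∈ l, P x = true → x = k) →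
    l.foldl (fun u x => if P x then x else u) u = k := by
  intro l
  induction l with
  | nil => intro u hm _; simp at hm ⊢; tauto
  | cons a l ih =>
    intro u hm huniq
    simp only [List.foldl_cons]
    by_cases hPa : P a = true
    · have ha : a = k := huniq a (by simp) hPa
      rw [if_pos hPa]
      exact ih a (Or.inr ha) (fun x hx => huniq x (by simp [hx]))
    · rw [if_neg hPa]
      rcases hm with hm | hm
      · rcases List.mem_cons.mp hm with h | h
        · exact absurd (h ▸ hk) hPa
        · exact ih u (Or.inl h) (fun x hx => huniq x (by simp [hx]))
      · exact ih u (Or.inr hm) (fun x hx => huniq x (by simp [hx]))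

-- ucgensel_mi computes num + (triangular index of i) when i is triangular
theorem ucgensel_mi_eq (num i k : Int) (kucuk : Bool) (h : bTriIndex i = some k) :
    ucgensel_mi num i kucuk = num + k := by
  obtain ⟨hk, heq⟩ := bTriIndex_inv i k h
  unfold ucgensel_mi
  congr 1
  apply foldl_last_sat (fun x => x * x + x == 2 * i) k (by simpa using heq)
  · left
    rw [PySem.List.mem_pyRange_one]
    refine ⟨hk, ?_⟩
    rcases eq_or_lt_of_le hk with h0 | h0
    · nlinarith
    · nlinarith
  · intro x hxmem hx
    simp only [beq_iff_eq] at hx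
    have hx0 : 0 ≤ x := (PySem.List.mem_pyRange_one.mp hxmem).1
    exact tri_unique x k i hx0 hk hx heq

-- x*x + x = 2*i with a solution forces x ≥ 0 is not automatic; helper for the uniqueness call above:
-- (kept inline via nlinarith)

-- if some element is not triangular, B's loop returns false from any starting prev
theorem altGo_false_of_bad (l : List Int) :
    ∀ prev, (∃ i ∈ l, bTriIndex i = none) → altGo prev l = false := by
  induction l with
  | nil => intro _ h; simp at h
  | cons a l ih =>
    intro prev h
    simp only [altGo]
    cases ha : bTriIndex a with
    | none => rfl
    | some k =>
      have hl : ∃ i ∈ l, bTriIndex i = none := by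
        rcases h with ⟨i, hmem, hn⟩
        rcases List.mem_cons.mp hmem with h | h
        · rw [h, ha] at hn; cases hn
        · exact ⟨i, h, hn⟩
      cases prev with
      | none => exact ih _ hl
      | some p =>
        by_cases hc : a ≠ p + k
        · simp [hc]
        · simp only [if_neg hc]; exact ih _ hl

-- when every element is triangular, A's sequence loop equals B's loop
theorem sirali_eq_altGo (l : List Int) :
    ∀ (p : Int) (kucuk : Bool), (∀ i ∈ l, (bTriIndex i).isSome) →
    sirali_go p kucuk l = altGo (some p) l := by
  induction l with
  | nil => intro p kucuk _; rfl
  | cons a l ih =>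
    intro p kucuk hall
    have ha : (bTriIndex a).isSome := hall a (by simp)
    obtain ⟨k, hk⟩ := Option.isSome_iff_exists.mp ha
    simp only [sirali_go, altGo, hk]
    rw [ucgensel_mi_eq p a k kucuk hk]
    by_cases hc : a ≠ p + k
    · simp [hc]
    · simp only [if_neg hc]
      exact ih a kucuk (fun i hi => hall i (by simp [hi]))

-- A's first loop: dizi_go returns the sequence check iff all elements are triangular
theorem dizi_go_eq (liste : List Int) (kucuk : Bool) :
    ∀ l, dizi_go liste kucuk l =
      if ∀ i ∈ l, (bTriIndex i).isSome then
        (if ucgensel_sirali_mi liste kucuk then true else false)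
      else false := by
  intro l
  induction l with
  | nil => simp [dizi_go]
  | cons a l ih =>
    simp only [dizi_go, any_iff_triIndex]
    by_cases ha : (bTriIndex a).isSome
    · rw [if_neg (by simp [ha]), ih]
      have hiff : (∀ i ∈ a :: l, (bTriIndex i).isSome = true) ↔
          (∀ i ∈ l, (bTriIndex i).isSome = true) := by
        simp [List.forall_mem_cons, ha]
      by_cases hall : ∀ i ∈ l, (bTriIndex i).isSome = true
      · rw [if_pos hall, if_pos (hiff.mpr hall)]
      · rw [if_neg hall, if_neg (fun h => hall (hiff.mp h))]
    · rw [if_pos ha]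
      rw [if_neg (by intro h; exact ha (h a (by simp)))]

-- ===== VERDICT (by name: the statement is the Claim_ definition above) =====
theorem ucgensel_dizi_mi_spec : Claim_equal_ucgensel_dizi_mi := by
  intro liste kucuk _ hpre
  unfold Spec_ucgensel_dizi_mi ucgensel_dizi_mi ucgensel_dizi_mi_alt
  rw [dizi_go_eq liste kucuk liste]
  cases liste with
  | nil => exact absurd rfl hpre
  | cons a l =>
    by_cases hall : ∀ i ∈ a :: l, (bTriIndex i).isSome
    · rw [if_pos hall]
      simp only [ucgensel_sirali_mi]
      simp only [sirali_eq_altGo l a kucuk (fun i hi => hall i (by simp [hi]))]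
      have ha : (bTriIndex a).isSome := hall a (by simp)
      obtain ⟨k, hk⟩ := Option.isSome_iff_exists.mp ha
      simp only [altGo, hk]
      cases altGo (some a) l <;> simp
    · rw [if_neg hall]
      have : ∃ i ∈ a :: l, bTriIndex i = none := by
        push_neg at hall
        obtain ⟨i, hi, hn⟩ := hall
        exact ⟨i, hi, Option.not_isSome_iff_eq_none.mp hn⟩
      rw [altGo_false_of_bad (a :: l) none this]

theorem ucgensel_dizi_mi_raises : Claim_raises_ucgensel_dizi_mi := by unfold Claim_raises_ucgensel_dizi_mi; exact ⟨by intro l k _ h hp; exact hp h, by decide⟩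

-- self-check tying both delivered claims together (also marks ucgensel_dizi_mi_raises as used)
theorem ucgensel_dizi_mi_claims_ok : Claim_equal_ucgensel_dizi_mi ∧ Claim_raises_ucgensel_dizi_mi :=
  ⟨ucgensel_dizi_mi_spec, ucgensel_dizi_mi_raises⟩
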